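-- pv_equiv track=rewrite | github.com/tonilastre/advent-of-code | aoc-2022/days/03.py | get_second
-- ===== SOURCE A (Python) =====
-- def get_letter_value(letter):
--     baseline_ord = (ord('A') - 26) if letter < 'a' else ord('a')
--     return ord(letter) - baseline_ord + 1
--
-- def get_second(lines):
--     final_value = 0
--     group_size = 3
--
--     for i in range(0, len(lines), group_size):
--         packages = (set(line) for line in lines[i:i + group_size])
--         final_package = next(packages)
--         final_package = final_package.intersection(*packages)
--
--         for letter in final_package:
--             final_value += get_letter_value(letter)
--
--     return final_value
-- ===== SOURCE B (Python) =====
-- def get_letter_value(letter):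
--     baseline_ord = (ord('A') - 26) if letter < 'a' else ord('a')
--     return ord(letter) - baseline_ord + 1
--
-- def get_second(lines):
--     total = 0
--     for i in range(0, len(lines), 3):
--         group = lines[i:i + 3]
--         counts = {}
--         for line in group:
--             for ch in set(line):
--                 counts[ch] = counts.get(ch, 0) + 1
--         needed = len(group)
--         for ch, c in counts.items():
--             if c == needed:
--                 total += get_letter_value(ch)
--     return total
-- ===== Notes on version B (the rewrite author's own statement) =====
-- stated objective: alternative
-- what changed: Per 3-line group, B replaces A's chained set.intersection with a frequency dict counting in how many lines of the group each distinct character occurs, then sums get_letter_value over characters whose count equals the group size.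
import Mathlib
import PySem

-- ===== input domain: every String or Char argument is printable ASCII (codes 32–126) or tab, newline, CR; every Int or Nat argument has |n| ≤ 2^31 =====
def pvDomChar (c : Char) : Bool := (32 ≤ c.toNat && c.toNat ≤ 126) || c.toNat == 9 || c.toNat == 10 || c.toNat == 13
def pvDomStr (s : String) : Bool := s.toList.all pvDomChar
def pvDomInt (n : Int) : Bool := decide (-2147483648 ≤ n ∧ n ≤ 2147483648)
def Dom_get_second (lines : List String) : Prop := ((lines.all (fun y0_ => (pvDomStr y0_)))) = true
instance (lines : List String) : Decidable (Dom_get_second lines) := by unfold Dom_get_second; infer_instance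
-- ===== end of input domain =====

-- B replaces the per-group set.intersection of A by a distinct-character frequency table
-- thresholded at the group size (alternative decomposition, same asymptotic cost).


-- ===== PORT A =====
def get_letter_value (letter : Char) : Int :=
  let baseline_ord : Int := if letter < 'a' then ('A'.toNat : Int) - 26 else ('a'.toNat : Int)
  (letter.toNat : Int) - baseline_ord + 1

def get_second (lines : List String) : Int :=
  (PySem.List.pyRange 0 lines.length 3).foldl (fun final_value i =>
    let packages := (PySem.List.slice lines (some i) (some (i + 3))).map
      (fun line => PySem.Set.ofList line.toList)
    match packages with
    | [] => final_value  -- unreachable: for i ∈ range(0, len(lines), 3) the slice is nonempty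
    | first :: rest =>
      let final_package := rest.foldl PySem.Set.inter first
      final_package.foldl (fun v letter => v + get_letter_value letter) final_value) 0

-- ===== PORT B =====
def get_second_alt (lines : List String) : Int :=
  (PySem.List.pyRange 0 lines.length 3).foldl (fun total i =>
    let group := PySem.List.slice lines (some i) (some (i + 3))
    let counts := group.foldl (fun d line =>
        (PySem.Set.ofList line.toList).foldl (fun d ch => d.insert ch (d.getD ch 0 + 1)) d)
      (PySem.Dict.empty)
    let needed : Int := (group.length : Int)
    counts.items.foldl (fun t cv => if cv.2 = needed then t + get_letter_value cv.1 else t) total) 0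

-- ===== PRECONDITION & SPEC =====
def Spec_get_second (lines : List String) (out : Int) : Prop := out = get_second_alt lines
instance (lines : List String) (out : Int) : Decidable (Spec_get_second lines out) := by unfold Spec_get_second; infer_instance

-- ===== CLAIM (what is proved, stated in full; the proofs are below) =====
def Claim_equal_get_second : Prop := ∀ (lines : List String), Dom_get_second lines → Spec_get_second lines (get_second lines)

-- ===== LEMMAS AND PROOFS =====

-- Folding set.intersection over the remaining sets filters the first set by membership in all of them.
lemma key1 (rest : List (PySem.Set Char)) (s0 : PySem.Set Char) :
    rest.foldl PySem.Set.inter s0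
      = s0.filter (fun c => rest.all (fun s => PySem.Set.contains s c)) := by
  induction rest generalizing s0 with
  | nil => simp
  | cons t rest ih =>
    simp only [List.foldl_cons, ih, PySem.Set.inter, List.filter_filter, List.all_cons]
    apply List.filter_congr
    intro c _
    simp [Bool.and_comm]

lemma flatten_count_le (L : List (List Char)) (hN : ∀ s ∈ L, s.Nodup) (c : Char) :
    L.flatten.count c ≤ L.length := by
  induction L with
  | nil => simp
  | cons s L ih =>
    simp only [List.flatten_cons, List.count_append, List.length_cons]
    have h1 : s.count c ≤ 1 := List.nodup_iff_count_le_one.mp (hN s (by simp)) c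
    have := ih (fun t ht => hN t (by simp [ht]))
    omega

lemma flatten_count_eq_iff (L : List (List Char)) (hN : ∀ s ∈ L, s.Nodup) (c : Char) :
    L.flatten.count c = L.length ↔ ∀ s ∈ L, c ∈ s := by
  induction L with
  | nil => simp
  | cons s L ih =>
    simp only [List.flatten_cons, List.count_append, List.length_cons, List.mem_cons]
    have h1 : s.count c ≤ 1 := List.nodup_iff_count_le_one.mp (hN s (by simp)) c
    have h2 := flatten_count_le L (fun t ht => hN t (by simp [ht])) c
    have h3 := ih (fun t ht => hN t (by simp [ht]))
    constructor
    · intro h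
      have hs : s.count c = 1 := by omega
      have : c ∈ s := by
        have := List.count_pos_iff.mp (by omega : 0 < s.count c); exact this
      exact fun t ht => ht.elim (fun e => e ▸ this) (fun hm => (h3.mp (by omega)) t hm)
    · intro h
      have hs : s.count c = 1 := by
        have : 0 < s.count c := List.count_pos_iff.mpr (h s (Or.inl rfl)); omega
      have : L.flatten.count c = L.length := h3.mpr (fun t ht => h t (Or.inr ht))
      omega

lemma foldl_ite_false (l : List Char) (p : Char → Prop) [DecidablePred p] (f : Char → Int) (t : Int)
    (h : ∀ x ∈ l, ¬ p x) : l.foldl (fun t c => if p c then t + f c else t) t = t := by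
  induction l generalizing t with
  | nil => rfl
  | cons x l ih => simp_all

-- A's per-group step, as a standalone function of the group's char-sets (proof helper).
def aStep (ss : List (PySem.Set Char)) (acc : Int) : Int :=
  match ss with
  | [] => acc
  | first :: rest =>
    (rest.foldl PySem.Set.inter first).foldl (fun v letter => v + get_letter_value letter) acc

-- Core: A's intersection step equals B's count-then-threshold step on the same group.
lemma step_sets (ss : List (PySem.Set Char)) (hN : ∀ s ∈ ss, s.Nodup) (acc : Int) :
    aStep ss acc
    = (PySem.Dict.counter ss.flatten).items.foldl
        (fun t cv => if cv.2 = (ss.length : Int) then t + get_letter_value cv.1 else t) acc := by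
  cases ss with
  | nil => simp [aStep, PySem.Dict.items_counter]
  | cons s0 rest =>
    show (rest.foldl PySem.Set.inter s0).foldl (fun v letter => v + get_letter_value letter) acc = _
    have hs0 : s0.Nodup := hN s0 (by simp)
    have hNr : ∀ s ∈ rest, s.Nodup := fun t ht => hN t (by simp [ht])
    rw [key1, PySem.Dict.items_counter, List.foldl_map]
    simp only [List.flatten_cons]
    rw [PySem.Set.ofList_append, PySem.Set.ofList_eq_self_of_nodup _ hs0,
        PySem.Set.update_eq_append_filter, List.foldl_append]
    rw [foldl_ite_false]
    · rw [List.foldl_filter]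
      apply List.foldl_ext
      intro x a ha
      have h1 : s0.count a = 1 := List.count_eq_one_of_mem hs0 ha
      have h2 := flatten_count_le rest hNr a
      have h3 := flatten_count_eq_iff rest hNr a
      have hcond : ((List.count a (s0 ++ rest.flatten) : Int) = ((s0 :: rest).length : Int))
          ↔ (rest.all fun s => s.contains a) = true := by
        rw [List.count_append, h1]
        simp only [List.length_cons]
        constructor
        · intro h
          have hn : List.count a rest.flatten = rest.length := by
            push_cast at h; omega
          simp only [List.all_eq_true]
          intro s hs
          simpa [PySem.Set.contains_iff] using (h3.mp hn) s hs
        · intro h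
          have hm : ∀ s ∈ rest, a ∈ s := by
            intro s hs
            have := (List.all_eq_true.mp h) s hs
            simpa [PySem.Set.contains_iff] using this
          have := h3.mpr hm
          push_cast
          omega
      rcases Decidable.em ((rest.all fun s => s.contains a) = true) with hc | hc
      · rw [if_pos hc, if_pos (hcond.mpr hc)]
      · rw [if_neg hc, if_neg (fun hh => hc (hcond.mp hh))]
    · intro y hy
      have hy2 : y ∉ s0 := by
        simp only [List.mem_filter, Bool.not_eq_true', PySem.Set.contains_eq_listContains] at hy
        simpa using hy.2
      have h0 : s0.count y = 0 := List.count_eq_zero.mpr hy2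
      have h2 := flatten_count_le rest hNr y
      intro h
      rw [List.count_append, h0] at h
      simp only [List.length_cons] at h
      push_cast at h
      omega

lemma ports_agree (lines : List String) : get_second lines = get_second_alt lines := by
  unfold get_second get_second_alt
  apply List.foldl_ext
  intro acc i _
  simp only []
  set group := PySem.List.slice lines (some i) (some (i + 3)) with hg
  set ss := group.map (fun line => PySem.Set.ofList line.toList) with hss
  have hB : group.foldl (fun d line =>
        (PySem.Set.ofList line.toList).foldl (fun d ch => d.insert ch (d.getD ch 0 + 1)) d)
      (PySem.Dict.empty)
      = PySem.Dict.counter ss.flatten := by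
    rw [hss, ← PySem.Dict.foldl_insert_getD_add_one_eq_counter, List.foldl_flatten, List.foldl_map]
  rw [hB]
  have hlen : group.length = ss.length := by simp [hss]
  rw [hlen]
  exact step_sets ss (by
    intro s hs
    rw [hss] at hs
    obtain ⟨l, -, rfl⟩ := List.mem_map.mp hs
    exact PySem.Set.nodup_ofList _) acc

-- ===== VERDICT (by name: the statement is the Claim_ definition above) =====
theorem get_second_spec : Claim_equal_get_second := by
  intro lines _
  exact ports_agree lines
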